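-- pv_equiv track=rewrite | github.com/georgek/adventofcode | 2021/day/2/solution.py | calculate_position_new
-- ===== SOURCE A (Python) =====
-- def calculate_position_new(instructions: list[str]) -> tuple[int, int]:
--     horizontal = 0
--     depth = 0
--     aim = 0
--     for instruction in instructions:
--         match instruction.split():
--             case ["forward", amount]:
--                 horizontal += int(amount)
--                 depth += aim*int(amount)
--             case ["down", amount]:
--                 aim += int(amount)
--             case ["up", amount]:
--                 aim -= int(amount)
--
--     return horizontal, depth
-- ===== SOURCE B (Python) =====
-- def calculate_position_new(instructions: list[str]) -> tuple[int, int]: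
--     parsed = []
--     for instruction in instructions:
--         parts = instruction.split()
--         if len(parts) == 2 and parts[0] in ("forward", "down", "up"):
--             parsed.append((parts[0], int(parts[1])))
--     aims = []
--     aim = 0
--     for command, amount in parsed:
--         aims.append(aim)
--         aim += amount if command == "down" else -amount if command == "up" else 0
--     horizontal = sum(amount for command, amount in parsed if command == "forward")
--     depth = sum(amount * a for (command, amount), a in zip(parsed, aims)
--                 if command == "forward")
--     return horizontal, depth
-- ===== Notes on version B (the rewrite author's own statement) =====
-- stated objective: alternative
-- what changed: Replaces A's single fold carrying a (horizontal, depth, aim) state triple by a parse pass into (command, amount) pairs, a prefix table of running aim values, and two independent sums (horizontal over forwards; depth over forwards zipped with the aim table).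
import Mathlib
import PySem

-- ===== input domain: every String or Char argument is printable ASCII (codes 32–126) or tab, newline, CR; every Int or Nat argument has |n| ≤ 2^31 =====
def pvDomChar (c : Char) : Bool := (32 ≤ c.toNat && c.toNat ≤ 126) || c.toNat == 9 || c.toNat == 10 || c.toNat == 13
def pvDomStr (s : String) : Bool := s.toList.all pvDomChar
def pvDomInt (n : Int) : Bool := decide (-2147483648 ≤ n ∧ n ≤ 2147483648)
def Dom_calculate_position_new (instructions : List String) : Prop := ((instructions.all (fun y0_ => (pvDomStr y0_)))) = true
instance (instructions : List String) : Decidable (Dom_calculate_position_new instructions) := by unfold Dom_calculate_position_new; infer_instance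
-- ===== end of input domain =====

-- B replaces A's single fold with triple state by a parse pass, a prefix table of
-- running aims, and two independent sums (a different decomposition, not faster).

-- ===== PORT A =====
-- the `.getD 0` is unreachable under Pre_: Python raises ValueError there (excluded)
def pvAStep (st : Int × Int × Int) (instruction : String) : Int × Int × Int :=
  match PySem.Str.split₀ instruction with
  | ["forward", amount] =>
      (st.1 + (PySem.Int.ofStr? amount).getD 0,
       st.2.1 + st.2.2 * (PySem.Int.ofStr? amount).getD 0, st.2.2)
  | ["down", amount] => (st.1, st.2.1, st.2.2 + (PySem.Int.ofStr? amount).getD 0)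
  | ["up", amount] => (st.1, st.2.1, st.2.2 - (PySem.Int.ofStr? amount).getD 0)
  | _ => st

def calculate_position_new (instructions : List String) : Int × Int :=
  let r := instructions.foldl pvAStep (0, 0, 0)
  (r.1, r.2.1)

-- ===== PORT B =====
-- the `.getD 0` is unreachable under Pre_: Python raises ValueError there (excluded)
def pvParse (instructions : List String) : List (String × Int) :=
  instructions.foldl (fun parsed instruction =>
    match PySem.Str.split₀ instruction with
    | [c, t] =>
        if c = "forward" ∨ c = "down" ∨ c = "up"
        then parsed ++ [(c, (PySem.Int.ofStr? t).getD 0)]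
        else parsed
    | _ => parsed) []

def pvAims (parsed : List (String × Int)) : List Int :=
  (parsed.foldl (fun (st : List Int × Int) p =>
      (st.1 ++ [st.2],
       st.2 + (if p.1 = "down" then p.2 else if p.1 = "up" then -p.2 else 0)))
    ([], 0)).1

def calculate_position_new_alt (instructions : List String) : Int × Int :=
  let parsed := pvParse instructions
  let aims := pvAims parsed
  let horizontal := parsed.foldl (fun s p => if p.1 = "forward" then s + p.2 else s) 0
  let depth := (parsed.zip aims).foldl
      (fun s q => if q.1.1 = "forward" then s + q.1.2 * q.2 else s) 0
  (horizontal, depth)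

-- ===== PRECONDITION & SPEC =====
-- Pre_ excludes exactly the inputs where Python A raises ValueError: an instruction
-- that splits into a recognised command word plus a token int() cannot parse.
def Pre_calculate_position_new (instructions : List String) : Prop :=
  ∀ s ∈ instructions,
    ((PySem.Str.split₀ s).length = 2 ∧
      ((PySem.Str.split₀ s).headD "" = "forward" ∨
       (PySem.Str.split₀ s).headD "" = "down" ∨
       (PySem.Str.split₀ s).headD "" = "up")) →
    (PySem.Int.ofStr? ((PySem.Str.split₀ s).getD 1 "")).isSome = true
instance (instructions : List String) : Decidable (Pre_calculate_position_new instructions) := by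
  unfold Pre_calculate_position_new; infer_instance

def pvWitness_calculate_position_new : List String := ["forward 2", "down 3", "forward 1", "up 1", "hello"]

def Spec_calculate_position_new (instructions : List String) (out : Int × Int) : Prop := out = calculate_position_new_alt instructions
instance (instructions : List String) (out : Int × Int) : Decidable (Spec_calculate_position_new instructions out) := by unfold Spec_calculate_position_new; infer_instance

-- ===== CLAIM (what is proved, stated in full; the proofs are below) =====
def Claim_equal_calculate_position_new : Prop := ∀ (instructions : List String), Dom_calculate_position_new instructions → Pre_calculate_position_new instructions → Spec_calculate_position_new instructions (calculate_position_new instructions)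

-- ===== LEMMAS AND PROOFS =====

def pvDelta (p : String × Int) : Int :=
  if p.1 = "down" then p.2 else if p.1 = "up" then -p.2 else 0

def pvParseOne (instruction : String) : List (String × Int) :=
  match PySem.Str.split₀ instruction with
  | [c, t] =>
      if c = "forward" ∨ c = "down" ∨ c = "up"
      then [(c, (PySem.Int.ofStr? t).getD 0)]
      else []
  | _ => []

def pvStep' (st : Int × Int × Int) (p : String × Int) : Int × Int × Int :=
  (st.1 + (if p.1 = "forward" then p.2 else 0),
   st.2.1 + (if p.1 = "forward" then st.2.2 * p.2 else 0),
   st.2.2 + pvDelta p)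

def pvHsum : List (String × Int) → Int
  | [] => 0
  | p :: ps => (if p.1 = "forward" then p.2 else 0) + pvHsum ps

def pvDsum (a : Int) : List (String × Int) → Int
  | [] => 0
  | p :: ps => (if p.1 = "forward" then a * p.2 else 0) + pvDsum (a + pvDelta p) ps

def pvAsum : List (String × Int) → Int
  | [] => 0
  | p :: ps => pvDelta p + pvAsum ps

def pvAimsFrom (a : Int) : List (String × Int) → List Int
  | [] => []
  | p :: ps => a :: pvAimsFrom (a + pvDelta p) ps

lemma pvParse_eq_flatMap (instructions : List String) :
    pvParse instructions = instructions.flatMap pvParseOne := by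
  have h : ∀ (acc : List (String × Int)),
      instructions.foldl (fun parsed instruction =>
        match PySem.Str.split₀ instruction with
        | [c, t] =>
            if c = "forward" ∨ c = "down" ∨ c = "up"
            then parsed ++ [(c, (PySem.Int.ofStr? t).getD 0)]
            else parsed
        | _ => parsed) acc = acc ++ instructions.flatMap pvParseOne := by
    induction instructions with
    | nil => intro acc; simp
    | cons ins rest ih =>
      intro acc
      simp only [List.foldl_cons, List.flatMap_cons, ih]
      cases h : PySem.Str.split₀ ins with
      | nil => simp [pvParseOne, h]
      | cons c l =>
        cases l with
        | nil => simp [pvParseOne, h]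
        | cons t l2 =>
          cases l2 with
          | nil =>
            simp only [pvParseOne, h]
            split_ifs <;> simp
          | cons u l3 => simp [pvParseOne, h]
  simpa using h []

lemma pvAStep_eq (st : Int × Int × Int) (instruction : String) :
    pvAStep st instruction = (pvParseOne instruction).foldl pvStep' st := by
  unfold pvAStep pvParseOne
  cases h : PySem.Str.split₀ instruction with
  | nil => simp
  | cons c l =>
    cases l with
    | nil => simp
    | cons t l2 =>
      cases l2 with
      | nil =>
        by_cases hf : c = "forward"
        · subst hf; simp [pvStep', pvDelta]
        · by_cases hd : c = "down"
          · subst hd; simp [pvStep', pvDelta]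
          · by_cases hu : c = "up"
            · subst hu; simp [pvStep', pvDelta, sub_eq_add_neg]
            · simp [hf, hd, hu]
      | cons u l3 => simp

lemma pvAfold_eq (instructions : List String) (st : Int × Int × Int) :
    instructions.foldl pvAStep st = (instructions.flatMap pvParseOne).foldl pvStep' st := by
  induction instructions generalizing st with
  | nil => rfl
  | cons ins rest ih => simp [pvAStep_eq, ih]

lemma pvStep'_char (ps : List (String × Int)) (h d a : Int) :
    ps.foldl pvStep' (h, d, a) = (h + pvHsum ps, d + pvDsum a ps, a + pvAsum ps) := by
  induction ps generalizing h d a with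
  | nil => simp [pvHsum, pvDsum, pvAsum]
  | cons p ps ih =>
    simp only [List.foldl_cons, pvStep', pvHsum, pvDsum, pvAsum, ih]
    refine Prod.ext (by ring) (Prod.ext (by ring) (by ring))

lemma pvHfold_char (ps : List (String × Int)) (s : Int) :
    ps.foldl (fun s p => if p.1 = "forward" then s + p.2 else s) s = s + pvHsum ps := by
  induction ps generalizing s with
  | nil => simp [pvHsum]
  | cons p ps ih =>
    simp only [List.foldl_cons, pvHsum, ih]
    split_ifs <;> ring

lemma pvAims_char (ps : List (String × Int)) (acc : List Int) (a : Int) :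
    ps.foldl (fun (st : List Int × Int) p =>
      (st.1 ++ [st.2],
       st.2 + (if p.1 = "down" then p.2 else if p.1 = "up" then -p.2 else 0))) (acc, a)
    = (acc ++ pvAimsFrom a ps, a + pvAsum ps) := by
  induction ps generalizing acc a with
  | nil => simp [pvAimsFrom, pvAsum]
  | cons p ps ih =>
    simp only [List.foldl_cons, pvAimsFrom, pvAsum, ih, pvDelta]
    rw [Prod.mk.injEq]; exact ⟨by simp, by ring⟩

lemma pvDfold_char (ps : List (String × Int)) (a s : Int) :
    (ps.zip (pvAimsFrom a ps)).foldl
      (fun s q => if q.1.1 = "forward" then s + q.1.2 * q.2 else s) s = s + pvDsum a ps := by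
  induction ps generalizing a s with
  | nil => simp [pvDsum]
  | cons p ps ih =>
    simp only [pvAimsFrom, List.zip_cons_cons, List.foldl_cons, pvDsum, ih]
    split_ifs with hf
    · have : pvDelta p = 0 := by simp [pvDelta, hf]
      rw [this]; ring_nf
    · ring

-- ===== VERDICT (by name: the statement is the Claim_ definition above) =====
theorem calculate_position_new_spec : Claim_equal_calculate_position_new := by
  intro instructions _ _
  unfold Spec_calculate_position_new calculate_position_new calculate_position_new_alt pvAims
  dsimp only
  rw [pvAfold_eq, ← pvParse_eq_flatMap, pvStep'_char, pvHfold_char, pvAims_char,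
    List.nil_append, pvDfold_char]
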